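-- pv_equiv track=rewrite | github.com/kirito2104/Programmazione_dei_compilatori_es_e_altro_17-06-2025 | 2)Codici e teoria delle lezioni/3)Esercizi_vari_importantissimi/10)Es_n6.5)Funzioni_max_min_con_key.py | modifica_lista
-- ===== SOURCE A (Python) =====
-- def modifica_lista(a):
--     """
--     Funzione che rimuove i duplicati da una lista di interi, preserva l'ordine originale,
--     crea una tupla dalla lista modificata e restituisce il valore minimo e massimo della tupla.
--
--     Complessità:
--     - Rimozione dei duplicati: O(n)
--     - Conversione in tupla: O(n)
--     - Calcolo di min e max: O(n)
--     - Complessità totale: **O(n)** (efficiente rispetto a O(n²) del doppio ciclo `while` iniziale)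
--     """
--
--     # Creazione di un insieme (set) per tracciare gli elementi già visti
--     # Complessità: O(1) per ogni operazione di lookup (controllo "in" e aggiunta)
--     elementi_visti = set()
--
--     # Creazione di una nuova lista per mantenere solo i numeri unici, preservando l'ordine
--     # Complessità: O(n), dato che iteriamo sulla lista una sola volta
--     nuova_lista = []
--
--     for num in a:
--         # Se il numero non è già stato visto, lo aggiungiamo alla nuova lista e al set
--         if num not in elementi_visti:
--             nuova_lista.append(num)  # Operazione O(1) per l'aggiunta in lista
--             elementi_visti.add(num)  # Operazione O(1) per l'aggiunta in set
--
--     # Conversione della lista senza duplicati in una tupla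
--     # Complessità: O(n), poiché copia ogni elemento nella nuova struttura dati
--     numbers_tuple = tuple(nuova_lista)
--
--     # Controlliamo se la tupla non è vuota per evitare errori con min() e max()
--     if numbers_tuple:
--         # Calcolo del valore massimo e minimo nella tupla
--         # Complessità: O(n) ciascuna
--         massimo = max(numbers_tuple)
--         minimo = min(numbers_tuple)
--     else:
--         # Se la tupla è vuota, assegniamo None per gestire il caso limite
--         massimo = minimo = None
--
--     # Restituzione dei valori minimo e massimo come tupla
--     return minimo, massimo
-- ===== SOURCE B (Python) =====
-- def modifica_lista(a):
--     """Dedup does not change min/max, so compute them straight from the input."""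
--     return (min(a), max(a)) if a else (None, None)
-- ===== Notes on version B (the rewrite author's own statement) =====
-- stated objective: simpler
-- what changed: Deduplication cannot change the minimum or maximum, so B drops the seen-set/unique-list pass entirely and returns (min(a), max(a)) directly (or (None, None) on empty input).
import Mathlib
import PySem

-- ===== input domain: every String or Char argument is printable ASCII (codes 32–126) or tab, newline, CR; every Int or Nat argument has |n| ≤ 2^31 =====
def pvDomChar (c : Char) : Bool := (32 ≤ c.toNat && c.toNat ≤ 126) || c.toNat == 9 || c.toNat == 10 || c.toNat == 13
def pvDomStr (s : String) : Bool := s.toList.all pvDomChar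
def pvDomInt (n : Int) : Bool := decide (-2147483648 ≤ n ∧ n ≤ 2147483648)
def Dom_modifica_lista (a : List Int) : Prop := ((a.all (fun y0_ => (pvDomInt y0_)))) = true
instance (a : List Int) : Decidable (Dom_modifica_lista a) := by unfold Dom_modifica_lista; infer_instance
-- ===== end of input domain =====

-- B drops A's seen-set/unique-list pass: dedup cannot change min/max, so B computes them straight from the input (simpler).


-- ===== PORT A =====
def modifica_lista (a : List Int) : Option Int × Option Int :=
  -- elementi_visti = set(); nuova_lista = []; for num in a: if num not in elementi_visti: append/add
  let st := a.foldl (fun (p : PySem.Set Int × List Int) num =>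
      if PySem.Set.contains p.1 num then p
      else (PySem.Set.add p.1 num, p.2 ++ [num])) (PySem.Set.empty, [])
  let numbers_tuple := st.2
  if numbers_tuple.isEmpty then (none, none)
  else (PySem.List.min? numbers_tuple (fun x => x), PySem.List.max? numbers_tuple (fun x => x))

-- ===== PORT B =====
def modifica_lista_alt (a : List Int) : Option Int × Option Int :=
  if a.isEmpty then (none, none)
  else (PySem.List.min? a (fun x => x), PySem.List.max? a (fun x => x))

-- ===== PRECONDITION & SPEC =====
def Spec_modifica_lista (a : List Int) (out : Option Int × Option Int) : Prop := out = modifica_lista_alt a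
instance (a : List Int) (out : Option Int × Option Int) : Decidable (Spec_modifica_lista a out) := by unfold Spec_modifica_lista; infer_instance

-- ===== CLAIM (what is proved, stated in full; the proofs are below) =====
def Claim_equal_modifica_lista : Prop := ∀ (a : List Int), Dom_modifica_lista a → Spec_modifica_lista a (modifica_lista a)

-- ===== LEMMAS AND PROOFS =====

-- loop invariant: the fold's accumulated unique list has the same members as init ++ processed prefix
theorem pv_fold_mem (l : List Int) (s : PySem.Set Int) (n : List Int)
    (hsn : ∀ x : Int, PySem.Set.contains s x = true ↔ x ∈ n) :
    ∀ x : Int, x ∈ (l.foldl (fun (p : PySem.Set Int × List Int) num =>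
      if PySem.Set.contains p.1 num then p
      else (PySem.Set.add p.1 num, p.2 ++ [num])) (s, n)).2 ↔ x ∈ n ∨ x ∈ l := by
  induction l generalizing s n with
  | nil => simp
  | cons hd tl ih =>
    intro x
    simp only [List.foldl_cons]
    by_cases h : PySem.Set.contains s hd = true
    · simp only [h, if_pos]
      rw [ih s n hsn]
      have : hd ∈ n := (hsn hd).mp h
      constructor
      · rintro (h1 | h1) <;> simp_all
      · rintro (h1 | h1)
        · exact Or.inl h1
        · rcases List.mem_cons.mp h1 with h2 | h2
          · exact Or.inl (h2 ▸ this)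
          · exact Or.inr h2
    · simp only [h, if_neg, Bool.false_eq_true, not_false_iff]
      rw [ih (PySem.Set.add s hd) (n ++ [hd]) (by
        intro y
        rw [PySem.Set.contains_iff, PySem.Set.mem_add]
        simp [← hsn y, or_comm])]
      simp [List.mem_append, List.mem_cons, or_assoc, or_comm, or_left_comm]

theorem pv_min?_ext (l1 l2 : List Int) (h : ∀ x, x ∈ l1 ↔ x ∈ l2) :
    PySem.List.min? l1 (fun x => x) = PySem.List.min? l2 (fun x => x) := by
  cases h1 : PySem.List.min? l1 (fun x => x) with
  | none =>
    have : l1 = [] := (PySem.List.min?_eq_none_iff _ _).mp h1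
    subst this
    have : l2 = [] := by
      cases l2 with
      | nil => rfl
      | cons y t => exact absurd ((h y).mpr (by simp)) (by simp)
    subst this; exact h1.symm
  | some m1 =>
    have hm1 : m1 ∈ l1 := PySem.List.min?_mem h1
    cases h2 : PySem.List.min? l2 (fun x => x) with
    | none =>
      have : l2 = [] := (PySem.List.min?_eq_none_iff _ _).mp h2
      subst this; exact absurd ((h m1).mp hm1) (by simp)
    | some m2 =>
      have hm2 : m2 ∈ l2 := PySem.List.min?_mem h2
      have h12 : m1 ≤ m2 := PySem.List.min?_isMin h1 m2 ((h m2).mpr hm2)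
      have h21 : m2 ≤ m1 := PySem.List.min?_isMin h2 m1 ((h m1).mp hm1)
      simp [le_antisymm h12 h21]

theorem pv_max?_ext (l1 l2 : List Int) (h : ∀ x, x ∈ l1 ↔ x ∈ l2) :
    PySem.List.max? l1 (fun x => x) = PySem.List.max? l2 (fun x => x) := by
  cases h1 : PySem.List.max? l1 (fun x => x) with
  | none =>
    have : l1 = [] := (PySem.List.max?_eq_none_iff _ _).mp h1
    subst this
    have : l2 = [] := by
      cases l2 with
      | nil => rfl
      | cons y t => exact absurd ((h y).mpr (by simp)) (by simp)
    subst this; exact h1.symm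
  | some m1 =>
    have hm1 : m1 ∈ l1 := PySem.List.max?_mem h1
    cases h2 : PySem.List.max? l2 (fun x => x) with
    | none =>
      have : l2 = [] := (PySem.List.max?_eq_none_iff _ _).mp h2
      subst this; exact absurd ((h m1).mp hm1) (by simp)
    | some m2 =>
      have hm2 : m2 ∈ l2 := PySem.List.max?_mem h2
      have h12 : m1 ≤ m2 := PySem.List.max?_isMax h2 m1 ((h m1).mp hm1)
      have h21 : m2 ≤ m1 := PySem.List.max?_isMax h1 m2 ((h m2).mpr hm2)
      simp [le_antisymm h12 h21]

-- ===== VERDICT (by name: the statement is the Claim_ definition above) =====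
theorem modifica_lista_spec : Claim_equal_modifica_lista := by
  intro a _
  unfold Spec_modifica_lista modifica_lista modifica_lista_alt
  dsimp only
  have hmem : ∀ x : Int, x ∈ (a.foldl (fun (p : PySem.Set Int × List Int) num =>
      if PySem.Set.contains p.1 num then p
      else (PySem.Set.add p.1 num, p.2 ++ [num])) (PySem.Set.empty, [])).2 ↔ x ∈ a := by
    intro x
    rw [pv_fold_mem a PySem.Set.empty [] (by intro y; simp [PySem.Set.empty, PySem.Set.contains])]
    simp
  set n := (a.foldl (fun (p : PySem.Set Int × List Int) num =>
      if PySem.Set.contains p.1 num then p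
      else (PySem.Set.add p.1 num, p.2 ++ [num])) (PySem.Set.empty, [])).2 with hn
  have hemp : n.isEmpty = a.isEmpty := by
    cases hcn : n with
    | nil =>
      cases hca : a with
      | nil => rfl
      | cons y t => exact absurd ((hmem y).mpr (by simp [hca])) (by simp [hcn])
    | cons y t =>
      cases hca : a with
      | nil => exact absurd ((hmem y).mp (by simp [hcn])) (by simp [hca])
      | cons z u => rfl
  rw [hemp]
  by_cases hae : a.isEmpty
  · simp [hae]
  · simp only [hae, if_neg, Bool.false_eq_true, not_false_iff]
    rw [pv_min?_ext n a hmem, pv_max?_ext n a hmem]
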